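-- pv_equiv track=rewrite | github.com/Lmstrgb/1_Python_intro | Sem_2/Homework_2_1_10.py | Count
-- ===== SOURCE A (Python) =====
-- def Count(a):
--   count1=''
--   count0=''
--   res_count=''
--   for i in range(len(a)):
--     if a[i]=='1':
--       count1+=str(i)
--     else:
--       count0+=str(i)
--   res_count=len(count0) if len(count1)>=len(count0) else len(count1)
--   return(res_count)
-- ===== SOURCE B (Python) =====
-- def Count(a):
--     # Bucket pass over digit-length ranges instead of per-index string building.
--     n = len(a)
--     s1 = 0
--     s0 = 0
--     for k in range(1, len(str(n)) + 1):
--         lo = 10 ** (k - 1) if k > 1 else 0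
--         hi = min(10 ** k, n)
--         ones = a[lo:hi].count('1')
--         s1 += k * ones
--         s0 += k * ((hi - lo) - ones)
--     return min(s1, s0)
-- ===== Notes on version B (the rewrite author's own statement) =====
-- stated objective: faster
-- what changed: Replaces the per-index loop that concatenates str(i) into two strings by an O(log n) loop over digit-length buckets [10^(k-1),10^k) that counts '1's in each slice with C-level str.count and accumulates k*count arithmetic sums, returning min(s1,s0).
import Mathlib
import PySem

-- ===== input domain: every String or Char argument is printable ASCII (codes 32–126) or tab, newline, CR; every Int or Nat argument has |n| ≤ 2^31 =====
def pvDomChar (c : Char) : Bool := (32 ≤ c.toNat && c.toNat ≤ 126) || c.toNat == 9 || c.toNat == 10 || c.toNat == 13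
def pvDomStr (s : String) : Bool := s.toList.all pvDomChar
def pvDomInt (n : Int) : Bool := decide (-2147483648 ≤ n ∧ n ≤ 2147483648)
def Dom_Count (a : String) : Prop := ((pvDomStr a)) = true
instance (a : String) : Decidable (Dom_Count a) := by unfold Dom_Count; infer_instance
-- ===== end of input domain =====

-- B replaces A's per-index string concatenation by a pass over digit-length buckets counting '1's per slice (measurably faster in Python).


-- ===== PORT A =====
-- loop body of A ('if a[i]=='1': count1+=str(i) else: count0+=str(i)')
def countStep (cs : List Char) (st : List Char × List Char) (i : Int) : List Char × List Char :=
  if PySem.List.pyGetD cs i ' ' = '1' then (st.1 ++ PySem.Int.toChars i, st.2)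
  else (st.1, st.2 ++ PySem.Int.toChars i)

def Count (a : String) : Int :=
  let cs := a.toList
  let st := (PySem.List.pyRange 0 (PySem.Str.len a) 1).foldl (countStep cs) ([], [])
  if st.1.length ≥ st.2.length then (st.2.length : Int) else (st.1.length : Int)

-- ===== PORT B =====
-- loop body of B: lo/hi bucket bounds, ones = a[lo:hi].count('1'); s1 += k*ones; s0 += k*((hi-lo)-ones)
def altStep (cs : List Char) (n : Int) (st : Int × Int) (k : Int) : Int × Int :=
  let lo : Int := if 1 < k then 10 ^ (k - 1).toNat else 0
  let hi : Int := min (10 ^ k.toNat) n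
  let ones : Int := ((PySem.Chars.count (PySem.List.slice cs (some lo) (some hi)) ['1'] : Nat) : Int)
  (st.1 + k * ones, st.2 + k * ((hi - lo) - ones))

def Count_alt (a : String) : Int :=
  let n : Int := PySem.Str.len a
  let d := (PySem.Int.toChars n).length     -- len(str(n))
  let st := (PySem.List.pyRange 1 ((d : Int) + 1) 1).foldl (altStep a.toList n) (0, 0)
  min st.1 st.2

-- ===== PRECONDITION & SPEC =====
def Spec_Count (a : String) (out : Int) : Prop := out = Count_alt a
instance (a : String) (out : Int) : Decidable (Spec_Count a out) := by unfold Spec_Count; infer_instance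

-- ===== CLAIM (what is proved, stated in full; the proofs are below) =====
def Claim_equal_Count : Prop := ∀ (a : String), Dom_Count a → Spec_Count a (Count a)

-- ===== LEMMAS AND PROOFS =====

-- number of decimal digits of m, as A's str(i) produces it
def dlen (m : Nat) : Nat := (Nat.toDigits 10 m).length
-- does position i of cs hold '1'?
def hitB (cs : List Char) (i : Nat) : Bool := cs.getD i ' ' == '1'
-- sum of digit lengths of the indices i ∈ [a, a+m) with (cs[i]=='1') == b
def SSeg (cs : List Char) (b : Bool) (a m : Nat) : Nat :=
  (((List.range' a m).filter (fun i => hitB cs i == b)).map dlen).sum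
-- clamped bucket right end: indices below min(10^t, n), with Mt n 0 = 0
def Mt (n t : Nat) : Nat := if t = 0 then 0 else min (10 ^ t) n
-- bucket left end, as B computes it
def LoN (j : Nat) : Nat := if 0 < j then 10 ^ j else 0
-- B's ones-count for bucket j
def cnt1 (cs : List Char) (j : Nat) : Nat :=
  ((cs.drop (LoN j)).take (Mt cs.length (j + 1) - LoN j)).count '1'
-- B's per-bucket count for each side
def cntB (cs : List Char) (b : Bool) (j : Nat) : Nat :=
  if b then cnt1 cs j else (Mt cs.length (j + 1) - LoN j) - cnt1 cs j

lemma toDigitsCore_len : ∀ (f n : Nat) (l : List Char), 0 < f → n < 10 ^ f →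
    (Nat.toDigitsCore 10 f n l).length = l.length + Nat.log 10 n + 1 := by
  intro f
  induction f with
  | zero => intro n l h _; omega
  | succ f ih =>
    intro n l _ hn
    rw [Nat.toDigitsCore]
    by_cases hd : n / 10 = 0
    · have hlt : n < 10 := by
        rcases (Nat.div_eq_zero_iff).mp hd with h | h
        · omega
        · exact h
      have hlog : Nat.log 10 n = 0 := by
        rw [Nat.log_eq_zero_iff]; exact Or.inl hlt
      simp [hd, hlog]
    · have h10 : 10 ≤ n := by
        by_contra hcon
        exact hd ((Nat.div_eq_zero_iff).mpr (Or.inr (by omega)))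
      have hf : 0 < f := by
        rcases Nat.eq_zero_or_pos f with h0 | h
        · subst h0; simp at hn; omega
        · exact h
      have hdiv : n / 10 < 10 ^ f := by
        apply Nat.div_lt_of_lt_mul
        calc n < 10 ^ (f + 1) := hn
          _ = 10 * 10 ^ f := by ring
      have hrec := ih (n / 10) (Nat.digitChar (n % 10) :: l) hf hdiv
      simp only [hd, if_false]
      rw [hrec]
      have hlog := Nat.log_div_base 10 n
      have hpos : 0 < Nat.log 10 n := Nat.log_pos (by norm_num) h10
      simp only [List.length_cons]
      omega

lemma dlen_eq (m : Nat) : dlen m = Nat.log 10 m + 1 := by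
  have h1 : m < 10 ^ (m + 1) :=
    lt_of_lt_of_le (Nat.lt_pow_self (by norm_num))
      (Nat.pow_le_pow_right (by norm_num) (Nat.le_succ m))
  have := toDigitsCore_len (m + 1) m [] (Nat.succ_pos m) h1
  simpa [dlen, Nat.toDigits] using this

lemma dlen_bucket (j i : Nat) (h1 : LoN j ≤ i) (h2 : i < 10 ^ (j + 1)) : dlen i = j + 1 := by
  rw [dlen_eq]
  rcases Nat.eq_zero_or_pos j with h0 | hj
  · subst h0
    have hi : i < 10 := by simpa using h2
    have : Nat.log 10 i = 0 := by rw [Nat.log_eq_zero_iff]; exact Or.inl hi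
    omega
  · have hlo : 10 ^ j ≤ i := by
      have : LoN j = 10 ^ j := by simp [LoN, hj]
      omega
    rw [Nat.log_eq_of_pow_le_of_lt_pow hlo h2]

lemma toChars_natCast (m : Nat) : PySem.Int.toChars (m : Int) = Nat.toDigits 10 m := by
  rw [PySem.Int.toChars.eq_def]
  simp

lemma countgo (c : Char) : ∀ (l : List Char) (fuel acc : Nat), l.length ≤ fuel →
    PySem.Chars.count.go [c] fuel l acc = acc + l.count c := by
  intro l
  induction l with
  | nil =>
    intro fuel acc _
    cases fuel <;> simp [PySem.Chars.count.go.eq_def]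
  | cons hd t ih =>
    intro fuel acc h
    cases fuel with
    | zero => simp at h
    | succ f =>
      rw [PySem.Chars.count.go.eq_def]
      by_cases hc : c = hd
      · subst hc
        have hpre : ([c]).isPrefixOf (c :: t) = true := by
          simp [List.isPrefixOf]
        simp only [hpre, if_true, List.length_singleton, List.drop_one, List.tail_cons]
        rw [ih f (acc + 1) (by simpa using Nat.le_of_succ_le_succ h)]
        simp
        omega
      · have hpre : ([c]).isPrefixOf (hd :: t) = false := by
          simp [List.isPrefixOf, hc]
        simp only [hpre, Bool.false_eq_true, if_false]
        rw [ih f acc (by simpa using Nat.le_of_succ_le_succ h)]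
        simp [Ne.symm hc]

lemma count_singleton (s : List Char) (c : Char) : PySem.Chars.count s [c] = s.count c := by
  rw [PySem.Chars.count]
  simpa only [List.isEmpty_cons, Bool.false_eq_true, if_false, Nat.zero_add] using
    countgo c s s.length 0 (le_refl _)

lemma seg_countP (cs : List Char) (p : Char → Bool) : ∀ (m a : Nat), a + m ≤ cs.length →
    ((cs.drop a).take m).countP p = (List.range' a m).countP (fun i => p (cs.getD i ' ')) := by
  intro m
  induction m with
  | zero => intro a _; simp
  | succ m ih =>
    intro a h
    have ha : a < cs.length := by omega
    rw [List.drop_eq_getElem_cons ha, List.take_succ_cons, List.range'_succ,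
      List.countP_cons, List.countP_cons, ih (a + 1) (by omega),
      List.getD_eq_getElem cs ' ' ha]

lemma SSeg_append (cs : List Char) (b : Bool) (a m1 m2 : Nat) :
    SSeg cs b a (m1 + m2) = SSeg cs b a m1 + SSeg cs b (a + m1) m2 := by
  unfold SSeg
  have h1 : List.range' a (m1 + m2) = List.range' a m1 ++ List.range' (a + m1) m2 := by
    have h := List.range'_append (s := a) (m := m1) (n := m2) (step := 1)
    rw [Nat.one_mul] at h
    exact h.symm
  rw [h1]
  simp only [List.filter_append, List.map_append, List.sum_append]

lemma SSeg_const (cs : List Char) (b : Bool) (a m K : Nat)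
    (h : ∀ i, a ≤ i → i < a + m → dlen i = K) :
    SSeg cs b a m = K * (List.range' a m).countP (fun i => hitB cs i == b) := by
  unfold SSeg
  rw [List.countP_eq_length_filter]
  have hmem : ∀ i ∈ (List.range' a m).filter (fun i => hitB cs i == b), dlen i = K := by
    intro i hi
    have hr := (List.mem_filter.mp hi).1
    have := List.mem_range'_1.mp hr
    exact h i this.1 this.2
  rw [List.map_congr_left hmem]
  simp [List.map_const', List.sum_replicate, Nat.mul_comm]

lemma countP_false_eq (cs : List Char) (a m : Nat) :
    (List.range' a m).countP (fun i => hitB cs i == false)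
      = m - (List.range' a m).countP (fun i => hitB cs i == true) := by
  have hlen := List.length_eq_countP_add_countP (p := fun i => hitB cs i == true)
    (l := List.range' a m)
  have heq : (fun i => decide ¬((hitB cs i == true) = true)) = (fun i => hitB cs i == false) := by
    funext i
    cases hv : hitB cs i <;> simp
  rw [heq] at hlen
  simp only [List.length_range'] at hlen
  omega

lemma LoN_le_n (n j : Nat) (hj : j ≤ Nat.log 10 n) : LoN j ≤ n := by
  unfold LoN
  rcases Nat.eq_zero_or_pos j with h0 | hpos
  · simp [h0]
  · have hn0 : n ≠ 0 := by
      intro h0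
      rw [h0, Nat.log_zero_right] at hj
      omega
    have h1 : 10 ^ j ≤ 10 ^ Nat.log 10 n := Nat.pow_le_pow_right (by norm_num) hj
    have h2 := Nat.pow_log_le_self 10 hn0
    rw [if_pos hpos]
    omega

lemma LoN_le_Mt (n j : Nat) (hj : j ≤ Nat.log 10 n) : LoN j ≤ Mt n (j + 1) := by
  have hM1 : Mt n (j + 1) = min (10 ^ (j + 1)) n := by simp [Mt]
  rw [hM1]
  refine le_min ?_ (LoN_le_n n j hj)
  unfold LoN
  rcases Nat.eq_zero_or_pos j with h0 | hpos
  · simp [h0]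
  · rw [if_pos hpos]; exact Nat.pow_le_pow_right (by norm_num) (by omega)

lemma cntP_eq_cnt1 (cs : List Char) (j : Nat) (hj : j ≤ Nat.log 10 cs.length) :
    (List.range' (LoN j) (Mt cs.length (j + 1) - LoN j)).countP (fun i => hitB cs i == true)
      = cnt1 cs j := by
  have hM1 : Mt cs.length (j + 1) = min (10 ^ (j + 1)) cs.length := by simp [Mt]
  have hMn : Mt cs.length (j + 1) ≤ cs.length := by rw [hM1]; exact min_le_right _ _
  have hle := LoN_le_Mt cs.length j hj
  have hseg := seg_countP cs (fun x => x == '1') (Mt cs.length (j + 1) - LoN j) (LoN j) (by omega)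
  unfold cnt1
  rw [List.count_eq_countP, hseg]
  apply List.countP_congr
  intro i _
  simp [hitB]

lemma bucket_step (cs : List Char) (b : Bool) (t : Nat) (ht : t < Nat.log 10 cs.length + 1) :
    SSeg cs b 0 (Mt cs.length (t + 1)) = SSeg cs b 0 (Mt cs.length t) + (t + 1) * cntB cs b t := by
  have hj : t ≤ Nat.log 10 cs.length := by omega
  have hLo := LoN_le_n cs.length t hj
  have hM1 : Mt cs.length (t + 1) = min (10 ^ (t + 1)) cs.length := by simp [Mt]
  have hMt : Mt cs.length t = LoN t := by
    unfold Mt LoN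
    rcases Nat.eq_zero_or_pos t with h0 | hpos
    · simp [h0]
    · have h10 : 10 ^ t ≤ cs.length := by
        have h := hLo; unfold LoN at h; rwa [if_pos hpos] at h
      rw [if_neg (by omega), if_pos hpos, Nat.min_eq_left h10]
  have hle : Mt cs.length t ≤ Mt cs.length (t + 1) := by
    rw [hMt]; exact LoN_le_Mt cs.length t hj
  have hsplit : Mt cs.length (t + 1) = Mt cs.length t + (Mt cs.length (t + 1) - Mt cs.length t) := by
    omega
  rw [hsplit, SSeg_append]
  congr 1
  simp only [Nat.zero_add]
  rw [hMt]
  have hK : ∀ i, LoN t ≤ i → i < LoN t + (Mt cs.length (t + 1) - LoN t) → dlen i = t + 1 := by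
    intro i h1 h2
    apply dlen_bucket t i h1
    have hup : Mt cs.length (t + 1) ≤ 10 ^ (t + 1) := by rw [hM1]; exact min_le_left _ _
    have := hMt ▸ hle
    omega
  rw [SSeg_const cs b (LoN t) (Mt cs.length (t + 1) - LoN t) (t + 1) hK]
  congr 1
  cases b
  · rw [countP_false_eq, cntP_eq_cnt1 cs t hj]
    simp [cntB]
  · rw [cntP_eq_cnt1 cs t hj]
    simp [cntB]

lemma buckets (cs : List Char) (b : Bool) : ∀ t, t ≤ Nat.log 10 cs.length + 1 →
    ((List.range t).map (fun j => (j + 1) * cntB cs b j)).sum = SSeg cs b 0 (Mt cs.length t) := by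
  intro t
  induction t with
  | zero => intro _; simp [Mt, SSeg]
  | succ t ih =>
    intro ht
    rw [List.range_succ, List.map_append, List.sum_append, ih (by omega)]
    simp only [List.map_cons, List.map_nil, List.sum_cons, List.sum_nil, Nat.add_zero]
    rw [bucket_step cs b t (by omega)]

lemma countStep_apply (cs : List Char) (st : List Char × List Char) (k : Nat) :
    countStep cs st (k : Int)
      = if cs.getD k ' ' = '1' then (st.1 ++ Nat.toDigits 10 k, st.2)
        else (st.1, st.2 ++ Nat.toDigits 10 k) := by
  unfold countStep
  rw [PySem.List.pyGetD_natCast, toChars_natCast]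

lemma A_fold (cs : List Char) : ∀ (ks : List Nat) (c1 c0 : List Char),
    (ks.map (fun k => ((k : Nat) : Int))).foldl (countStep cs) (c1, c0)
      = (c1 ++ (ks.filter (fun k => hitB cs k == true)).flatMap (fun k => Nat.toDigits 10 k),
         c0 ++ (ks.filter (fun k => hitB cs k == false)).flatMap (fun k => Nat.toDigits 10 k)) := by
  intro ks
  induction ks with
  | nil => simp
  | cons k ks ih =>
    intro c1 c0
    simp only [List.map_cons, List.foldl_cons, List.filter_cons]
    rw [countStep_apply]
    by_cases h : cs.getD k ' ' = '1'
    · have hb : hitB cs k = true := by unfold hitB; rw [h]; rfl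
      rw [if_pos h, ih]
      simp [hb]
    · have hb : hitB cs k = false := by unfold hitB; exact beq_eq_false_iff_ne.mpr h
      rw [if_neg h, ih]
      simp [hb]

lemma Count_eq (a : String) :
    Count a = if SSeg a.toList true 0 a.toList.length ≥ SSeg a.toList false 0 a.toList.length
              then (SSeg a.toList false 0 a.toList.length : Int)
              else (SSeg a.toList true 0 a.toList.length : Int) := by
  have hlen : PySem.Str.len a = (a.toList.length : Int) := by simp
  simp only [Count, hlen, PySem.List.pyRange_one, sub_zero, Int.toNat_natCast, zero_add]
  rw [A_fold a.toList (List.range a.toList.length) [] []]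
  have hS : ∀ b : Bool,
      (((List.range a.toList.length).filter (fun k => hitB a.toList k == b)).flatMap
        (fun k => Nat.toDigits 10 k)).length = SSeg a.toList b 0 a.toList.length := by
    intro b
    rw [List.length_flatMap]
    unfold SSeg
    rw [← List.range_eq_range']
    rfl
  simp only [List.nil_append]
  rw [hS true, hS false]

lemma altStep_elem (cs : List Char) (j : Nat) (hj : j ≤ Nat.log 10 cs.length) (st : Int × Int) :
    altStep cs (cs.length : Int) st ((1 : Int) + ↑j)
      = (st.1 + ((((j + 1) * cntB cs true j : Nat)) : Int),
         st.2 + ((((j + 1) * cntB cs false j : Nat)) : Int)) := by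
  simp only [altStep]
  have h1 : ((1 : Int) + ↑j - 1).toNat = j := by omega
  have h2 : ((1 : Int) + ↑j).toNat = j + 1 := by omega
  have hlo : (if 1 < (1 : Int) + ↑j then (10 : Int) ^ ((1 : Int) + ↑j - 1).toNat else 0)
      = ((LoN j : Nat) : Int) := by
    rw [h1]
    unfold LoN
    rcases Nat.eq_zero_or_pos j with h0 | hpos
    · simp [h0]
    · rw [if_pos (by omega), if_pos hpos]
      push_cast
      ring
  have hhi : min ((10 : Int) ^ ((1 : Int) + ↑j).toNat) (cs.length : Int)
      = ((Mt cs.length (j + 1) : Nat) : Int) := by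
    rw [h2]
    unfold Mt
    rw [if_neg (by omega)]
    push_cast
    ring_nf
  rw [hlo, hhi]
  rw [PySem.List.slice_toNat cs (by exact_mod_cast Nat.zero_le _) (by exact_mod_cast Nat.zero_le _)]
  simp only [Int.toNat_natCast]
  rw [count_singleton]
  have hcnt : (List.take (Mt cs.length (j + 1) - LoN j) (List.drop (LoN j) cs)).count '1'
      = cnt1 cs j := rfl
  rw [hcnt]
  have hle := LoN_le_Mt cs.length j hj
  have hc : cnt1 cs j ≤ Mt cs.length (j + 1) - LoN j :=
    le_trans (List.count_le_length) (List.length_take_le _ _)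
  simp only [Prod.mk.injEq]
  constructor
  · rw [show cntB cs true j = cnt1 cs j from rfl]
    push_cast
    ring
  · rw [show cntB cs false j = (Mt cs.length (j + 1) - LoN j) - cnt1 cs j from rfl]
    push_cast [Nat.cast_sub hc, Nat.cast_sub hle]
    ring

lemma B_fold (cs : List Char) : ∀ (js : List Nat) (s1 s0 : Int),
    (∀ j ∈ js, j ≤ Nat.log 10 cs.length) →
    (js.map (fun j => (1 : Int) + ↑j)).foldl (altStep cs (cs.length : Int)) (s1, s0)
      = (s1 + (((js.map (fun j => (j + 1) * cntB cs true j)).sum : Nat) : Int),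
         s0 + (((js.map (fun j => (j + 1) * cntB cs false j)).sum : Nat) : Int)) := by
  intro js
  induction js with
  | nil => intro s1 s0 _; simp
  | cons j js ih =>
    intro s1 s0 hmem
    simp only [List.map_cons, List.foldl_cons, List.sum_cons]
    rw [altStep_elem cs j (hmem j (by simp)) (s1, s0)]
    rw [ih _ _ (fun x hx => hmem x (by simp [hx]))]
    simp only [Prod.mk.injEq]
    constructor <;> (push_cast; ring)

lemma Mt_top (n : Nat) : Mt n (Nat.log 10 n + 1) = n := by
  unfold Mt
  rw [if_neg (by omega)]
  exact Nat.min_eq_right (le_of_lt (Nat.lt_pow_succ_log_self (by norm_num) n))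

lemma Count_alt_eq (a : String) :
    Count_alt a = min (SSeg a.toList true 0 a.toList.length : Int)
                      (SSeg a.toList false 0 a.toList.length : Int) := by
  have hlen : PySem.Str.len a = (a.toList.length : Int) := by simp
  have hd : (PySem.Int.toChars ((a.toList.length : Nat) : Int)).length
      = Nat.log 10 a.toList.length + 1 := by
    rw [toChars_natCast]
    exact dlen_eq a.toList.length
  simp only [Count_alt, hlen, hd, PySem.List.pyRange_one, add_sub_cancel_right, Int.toNat_natCast]
  rw [B_fold a.toList (List.range (Nat.log 10 a.toList.length + 1)) 0 0
    (fun j hj => by have := List.mem_range.mp hj; omega)]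
  rw [buckets a.toList true _ le_rfl, buckets a.toList false _ le_rfl, Mt_top]
  simp

-- ===== VERDICT (by name: the statement is the Claim_ definition above) =====
theorem Count_spec : Claim_equal_Count := by
  intro a _
  unfold Spec_Count
  rw [Count_eq, Count_alt_eq]
  rw [min_def]
  split_ifs with h1 h2 h3 <;> omega
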